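-- pv_equiv track=rewrite | github.com/llgeek/leetcode | 1153_StringTransformsIntoAnotherString/solution.py | if_transformable
-- ===== SOURCE A (Python) =====
-- def if_transformable(str1, str2):
--     """
--     return type: boolean
--     """
--     if len(str1) != len(str2):
--         return False
--
--     have = set()
--     change = {}
--     for i in range(len(str1)):
--         have.add(str2[i])
--         if str1[i] not in change:
--             change[str1[i]] = str2[i]
--         if change[str1[i]] != str2[i]:
--             return False
--     return len(change) >= len(have) and (len(have) < 26 or str1 == str2)
-- ===== SOURCE B (Python) =====
-- def if_transformable(str1, str2):
--     """
--     return type: boolean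
--     """
--     if len(str1) != len(str2):
--         return False
--     for c in set(str1):
--         if len({b for a, b in zip(str1, str2) if a == c}) != 1:
--             return False
--     return len(set(str2)) < 26 or str1 == str2
-- ===== Notes on version B (the rewrite author's own statement) =====
-- stated objective: alternative
-- what changed: Replaces A's single index-loop that incrementally builds a first-seen dict with early exit by a per-character grouping check: for each distinct character of str1 it collects that character's image set over the zipped pairs and requires it to be a singleton, conjoined with the free-character condition len(set(str2)) < 26 or str1 == str2; A's always-true len(change) >= len(have) term is dropped.
import Mathlib
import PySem

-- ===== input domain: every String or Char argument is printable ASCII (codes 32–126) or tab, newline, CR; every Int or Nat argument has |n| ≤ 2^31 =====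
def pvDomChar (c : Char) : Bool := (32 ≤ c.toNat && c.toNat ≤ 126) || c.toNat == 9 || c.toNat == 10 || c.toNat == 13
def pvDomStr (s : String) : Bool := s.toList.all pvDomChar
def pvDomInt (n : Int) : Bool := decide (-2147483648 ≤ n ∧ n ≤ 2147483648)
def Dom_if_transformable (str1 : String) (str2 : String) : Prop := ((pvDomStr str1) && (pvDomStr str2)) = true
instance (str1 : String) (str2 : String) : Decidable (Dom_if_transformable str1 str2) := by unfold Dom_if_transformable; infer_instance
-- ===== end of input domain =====

set_option maxRecDepth 4000


-- B replaces A's single-pass incremental first-seen dict by a per-character grouping check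
-- (every distinct character of str1 must have a singleton image set); objective: alternative.

-- ===== PORT A =====
-- the 'for i in range(len(str1))' loop; early 'return False' is the false branch;
-- the '| _, _ => none' arm is an unreachable totality guard (i is always in range).
def pvLoopA (l1 l2 : List Char) : List Int → PySem.Set Char → PySem.Dict Char Char → Bool
  | [], hv, ch =>
      -- 'return len(change) >= len(have) and (len(have) < 26 or str1 == str2)'
      decide (ch.size ≥ hv.length) && (decide (hv.length < 26) || decide (l1 = l2))
  | i :: rest, hv, ch =>
      match PySem.List.pyGet? l2 i, PySem.List.pyGet? l1 i with
      | some c2, some c1 =>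
          let hv' := PySem.Set.add hv c2                                  -- have.add(str2[i])
          let ch' := if ch.contains c1 then ch else ch.insert c1 c2       -- if str1[i] not in change: …
          if ch'.get? c1 ≠ some c2 then false                             -- if change[str1[i]] != str2[i]: return False
          else pvLoopA l1 l2 rest hv' ch'
      | _, _ => false

def if_transformable (str1 : String) (str2 : String) : Bool :=
  let l1 := str1.toList
  let l2 := str2.toList
  if l1.length ≠ l2.length then false
  else pvLoopA l1 l2 (PySem.List.pyRange 0 l1.length 1)
         (PySem.Set.empty : PySem.Set Char) (PySem.Dict.empty : PySem.Dict Char Char)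

-- ===== PORT B =====
-- the 'for c in set(str1)' loop of Source B; early 'return False' is the false branch
def pvLoopB (l1 l2 : List Char) : List Char → Bool
  | [] => decide ((PySem.Set.ofList l2).length < 26) || decide (l1 = l2)
  | c :: rest =>
      -- '{b for a, b in zip(str1, str2) if a == c}'
      if (PySem.Set.ofList (((l1.zip l2).filter (fun p => p.1 == c)).map Prod.snd)).length ≠ 1
      then false
      else pvLoopB l1 l2 rest

def if_transformable_alt (str1 : String) (str2 : String) : Bool :=
  let l1 := str1.toList
  let l2 := str2.toList
  if l1.length ≠ l2.length then false
  else pvLoopB l1 l2 (PySem.Set.ofList l1)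

-- ===== PRECONDITION & SPEC =====
def Spec_if_transformable (str1 : String) (str2 : String) (out : Bool) : Prop := out = if_transformable_alt str1 str2
instance (str1 : String) (str2 : String) (out : Bool) : Decidable (Spec_if_transformable str1 str2 out) := by unfold Spec_if_transformable; infer_instance

-- ===== CLAIM (what is proved, stated in full; the proofs are below) =====
def Claim_equal_if_transformable : Prop := ∀ (str1 : String) (str2 : String), Dom_if_transformable str1 str2 → Spec_if_transformable str1 str2 (if_transformable str1 str2)

-- ===== LEMMAS AND PROOFS =====

-- pair-level view of A's loop (same body, fed the pairs instead of indices)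
def pvLoopP (l1 l2 : List Char) : List (Char × Char) → PySem.Set Char → PySem.Dict Char Char → Bool
  | [], hv, ch =>
      decide (ch.size ≥ hv.length) && (decide (hv.length < 26) || decide (l1 = l2))
  | p :: rest, hv, ch =>
      let hv' := PySem.Set.add hv p.2
      let ch' := if ch.contains p.1 then ch else ch.insert p.1 p.2
      if ch'.get? p.1 ≠ some p.2 then false
      else pvLoopP l1 l2 rest hv' ch'

-- first-wins extension of the dict by the pairs
def pvExt (ch : PySem.Dict Char Char) (ps : List (Char × Char)) : PySem.Dict Char Char :=
  ps.foldl (fun d p => if d.contains p.1 then d else d.insert p.1 p.2) ch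

-- the conflict check of A's loop, separated from the state it returns
def pvOk (ch : PySem.Dict Char Char) : List (Char × Char) → Bool
  | [] => true
  | p :: rest =>
      let ch' := if ch.contains p.1 then ch else ch.insert p.1 p.2
      decide (ch'.get? p.1 = some p.2) && pvOk ch' rest

-- the pair list is a (partial) function
def pvFun (ps : List (Char × Char)) : Prop := ∀ a b b', (a, b) ∈ ps → (a, b') ∈ ps → b = b'

lemma pvExt_cons (ch : PySem.Dict Char Char) (p : Char × Char) (rest : List (Char × Char)) :
    pvExt ch (p :: rest) = pvExt (if ch.contains p.1 then ch else ch.insert p.1 p.2) rest := rfl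

lemma pvStep_get?_ne (ch : PySem.Dict Char Char) (k v a : Char) (ha : a ≠ k) :
    (if ch.contains k then ch else ch.insert k v).get? a = ch.get? a := by
  by_cases hc : ch.contains k
  · rw [if_pos hc]
  · rw [if_neg hc, PySem.Dict.get?_insert, if_neg ha]

lemma pvStep_get?_self (ch : PySem.Dict Char Char) (a b : Char) :
    ∃ c, (if ch.contains a then ch else ch.insert a b).get? a = some c ∧ (ch.get? a = some c ∨ c = b) := by
  by_cases hc : ch.contains a
  · rw [if_pos hc]
    rw [PySem.Dict.contains_eq_isSome_get?] at hc
    obtain ⟨c, hcv⟩ := Option.isSome_iff_exists.1 hc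
    exact ⟨c, hcv, Or.inl hcv⟩
  · rw [if_neg hc]
    exact ⟨b, by rw [PySem.Dict.get?_insert]; simp, Or.inr rfl⟩

lemma pvExt_mono (ps : List (Char × Char)) : ∀ (ch : PySem.Dict Char Char) (a b : Char),
    ch.get? a = some b → (pvExt ch ps).get? a = some b := by
  induction ps with
  | nil => intro ch a b h; simpa [pvExt] using h
  | cons p rest ih =>
    intro ch a b h
    rw [pvExt_cons]
    apply ih
    by_cases ha : a = p.1
    · subst ha
      have hc : ch.contains p.1 := by
        rw [PySem.Dict.contains_eq_isSome_get?, h]; rfl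
      rwa [if_pos hc]
    · rwa [pvStep_get?_ne ch p.1 p.2 a ha]

lemma pvExt_get?_mem (ps : List (Char × Char)) : ∀ (ch : PySem.Dict Char Char) (a b : Char),
    (pvExt ch ps).get? a = some b → ch.get? a = some b ∨ (a, b) ∈ ps := by
  induction ps with
  | nil => intro ch a b h; left; simpa [pvExt] using h
  | cons p rest ih =>
    intro ch a b h
    rw [pvExt_cons] at h
    rcases ih _ a b h with h' | h'
    · by_cases ha : a = p.1
      · subst ha
        by_cases hc : ch.contains p.1
        · rw [if_pos hc] at h'
          exact Or.inl h'
        · rw [if_neg hc, PySem.Dict.get?_insert, if_pos rfl] at h'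
          obtain rfl : p.2 = b := by simpa using h'
          exact Or.inr (by simp)
      · rw [pvStep_get?_ne ch p.1 p.2 a ha] at h'
        exact Or.inl h'
    · exact Or.inr (List.mem_cons_of_mem _ h')

lemma pvExt_isSome (ps : List (Char × Char)) : ∀ (ch : PySem.Dict Char Char) (a b : Char),
    (a, b) ∈ ps → ∃ b', (pvExt ch ps).get? a = some b' := by
  induction ps with
  | nil => intro ch a b h; simp at h
  | cons p rest ih =>
    intro ch a b h
    rw [pvExt_cons]
    rcases List.mem_cons.1 h with h | h
    · have ha : a = p.1 := congrArg Prod.fst h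
      have hb : b = p.2 := congrArg Prod.snd h
      subst ha; subst hb
      obtain ⟨c, hc1, -⟩ := pvStep_get?_self ch p.1 p.2
      exact ⟨c, pvExt_mono rest _ p.1 c hc1⟩
    · exact ih _ a b h

lemma pvOk_iff (ps : List (Char × Char)) : ∀ (ch : PySem.Dict Char Char),
    pvOk ch ps = true ↔ ∀ a b, (a, b) ∈ ps → (pvExt ch ps).get? a = some b := by
  induction ps with
  | nil => intro ch; simp [pvOk]
  | cons p rest ih =>
    intro ch
    simp only [pvOk, Bool.and_eq_true, decide_eq_true_eq, ih]
    constructor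
    · rintro ⟨h1, h2⟩ a b hab
      rw [pvExt_cons]
      rcases List.mem_cons.1 hab with h | h
      · have ha : a = p.1 := congrArg Prod.fst h
        have hb : b = p.2 := congrArg Prod.snd h
        subst ha; subst hb
        exact pvExt_mono rest _ p.1 p.2 h1
      · exact h2 a b h
    · intro h
      have hhead : (pvExt (if ch.contains p.1 then ch else ch.insert p.1 p.2) rest).get? p.1 = some p.2 := by
        rw [← pvExt_cons]; exact h p.1 p.2 (by simp)
      obtain ⟨c, hc1, -⟩ := pvStep_get?_self ch p.1 p.2
      have : (pvExt (if ch.contains p.1 then ch else ch.insert p.1 p.2) rest).get? p.1 = some c :=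
        pvExt_mono rest _ p.1 c hc1
      obtain rfl : c = p.2 := by rw [hhead] at this; simpa using this.symm
      refine ⟨hc1, fun a b hab => ?_⟩
      have := h a b (List.mem_cons_of_mem _ hab)
      rwa [pvExt_cons] at this

lemma pvOk_empty_iff (ps : List (Char × Char)) :
    pvOk (PySem.Dict.empty : PySem.Dict Char Char) ps = true ↔ pvFun ps := by
  rw [pvOk_iff]
  constructor
  · intro h a b b' h1 h2
    have e1 := h a b h1
    have e2 := h a b' h2
    rw [e1] at e2
    exact (Option.some.injEq _ _ ▸ e2 : b = b')
  · intro hf a b hab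
    obtain ⟨b', hb'⟩ := pvExt_isSome ps PySem.Dict.empty a b hab
    rcases pvExt_get?_mem ps PySem.Dict.empty a b' hb' with h | h
    · simp [PySem.Dict.get?_empty] at h
    · rw [hb', hf a b' b h hab]

lemma pvExt_keys (ps : List (Char × Char)) : ∀ (ch : PySem.Dict Char Char), ch.keys.Nodup →
    (pvExt ch ps).keys = PySem.Set.update ch.keys (ps.map Prod.fst) := by
  induction ps with
  | nil => intro ch _; simp [pvExt, PySem.Set.update_nil]
  | cons p rest ih =>
    intro ch hnd
    rw [pvExt_cons, List.map_cons, PySem.Set.update_cons]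
    by_cases hc : ch.contains p.1
    · have hmem : p.1 ∈ ch.keys := (PySem.Dict.contains_iff_mem_keys ch p.1).1 hc
      rw [if_pos hc, ih ch hnd, PySem.Set.add_of_mem hmem]
    · have hc' : ch.contains p.1 = false := by simpa using hc
      have hmem : p.1 ∉ ch.keys := fun hm => by
        simp [(PySem.Dict.contains_iff_mem_keys ch p.1).2 hm] at hc'
      rw [if_neg hc]
      rw [ih _ (by rw [PySem.Dict.keys_insert_of_not_contains _ _ hc']
                   rw [List.nodup_append]
                   exact ⟨hnd, List.nodup_singleton _, fun a ha b hb => by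
                     simp only [List.mem_singleton] at hb; subst hb; exact fun h => hmem (h ▸ ha)⟩)]
      rw [PySem.Dict.keys_insert_of_not_contains _ _ hc', PySem.Set.add_of_not_mem hmem]

lemma pvExt_size (ps : List (Char × Char)) :
    (pvExt (PySem.Dict.empty : PySem.Dict Char Char) ps).size = (PySem.Set.ofList (ps.map Prod.fst)).length := by
  have hk := pvExt_keys ps PySem.Dict.empty (by simp [PySem.Dict.keys_empty])
  have hs : (pvExt PySem.Dict.empty ps).size = (pvExt PySem.Dict.empty ps).keys.length := by
    simp [PySem.Dict.size, PySem.Dict.keys]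
  rw [hs, hk]
  rw [show PySem.Dict.empty.keys = (PySem.Set.empty : PySem.Set Char) from rfl,
     PySem.Set.update_empty]

lemma pvLoopP_eq (l1 l2 : List Char) (ps : List (Char × Char)) :
    ∀ (hv : PySem.Set Char) (ch : PySem.Dict Char Char),
    pvLoopP l1 l2 ps hv ch =
      (pvOk ch ps &&
        (decide ((pvExt ch ps).size ≥ (PySem.Set.update hv (ps.map Prod.snd)).length) &&
          (decide ((PySem.Set.update hv (ps.map Prod.snd)).length < 26) || decide (l1 = l2)))) := by
  induction ps with
  | nil =>
    intro hv ch
    show (decide (ch.size ≥ hv.length) && (decide (hv.length < 26) || decide (l1 = l2))) = _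
    rw [show pvOk ch [] = true from rfl, Bool.true_and, List.map_nil, PySem.Set.update_nil]
    rfl
  | cons p rest ih =>
    intro hv ch
    rw [pvExt_cons, List.map_cons, PySem.Set.update_cons]
    show (if (if ch.contains p.1 then ch else ch.insert p.1 p.2).get? p.1 ≠ some p.2 then false
          else pvLoopP l1 l2 rest (PySem.Set.add hv p.2) (if ch.contains p.1 then ch else ch.insert p.1 p.2)) = _
    rw [show pvOk ch (p :: rest) =
          (decide ((if ch.contains p.1 then ch else ch.insert p.1 p.2).get? p.1 = some p.2) &&
            pvOk (if ch.contains p.1 then ch else ch.insert p.1 p.2) rest) from rfl]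
    by_cases h : (if ch.contains p.1 then ch else ch.insert p.1 p.2).get? p.1 = some p.2
    · rw [if_neg (by simpa using h), decide_eq_true h, Bool.true_and]
      exact ih _ _
    · rw [if_pos (by simpa using h), decide_eq_false h]
      simp

lemma pv_len_ofList {α : Type} [BEq α] [LawfulBEq α] [DecidableEq α] (xs : List α) :
    (PySem.Set.ofList xs).length = xs.toFinset.card := by
  have h1 : (PySem.Set.ofList xs).toFinset = xs.toFinset := by
    ext a; simp [List.mem_toFinset, PySem.Set.mem_ofList]
  rw [← List.toFinset_card_of_nodup (PySem.Set.nodup_ofList (xs := xs)), h1]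

lemma pv_toFinset_map {α β : Type} [DecidableEq α] [DecidableEq β] (f : α → β) (l : List α) :
    (l.map f).toFinset = l.toFinset.image f := by
  ext b; simp

lemma pv_injOn_iff (ps : List (Char × Char)) :
    Set.InjOn Prod.fst (ps.toFinset : Set (Char × Char)) ↔ pvFun ps := by
  constructor
  · intro h a b b' h1 h2
    have := h (x₁ := (a, b)) (x₂ := (a, b')) (by simpa using h1) (by simpa using h2) rfl
    exact congrArg Prod.snd this
  · rintro hf ⟨a, b⟩ h1 ⟨a', b'⟩ h2 he
    simp only [Finset.mem_coe, List.mem_toFinset] at h1 h2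
    obtain rfl : a = a' := he
    exact Prod.ext rfl (hf a b b' h1 h2)

lemma pv_card_le (ps : List (Char × Char)) (h : pvFun ps) :
    (PySem.Set.ofList (ps.map Prod.snd)).length ≤ (PySem.Set.ofList (ps.map Prod.fst)).length := by
  rw [pv_len_ofList, pv_len_ofList, pv_toFinset_map, pv_toFinset_map]
  calc (ps.toFinset.image Prod.snd).card ≤ ps.toFinset.card := Finset.card_image_le
    _ = (ps.toFinset.image Prod.fst).card := (Finset.card_image_iff.2 ((pv_injOn_iff ps).2 h)).symm

lemma pvLoopP_cons (l1 l2 : List Char) (p : Char × Char) (rest : List (Char × Char))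
    (hv : PySem.Set Char) (ch : PySem.Dict Char Char) :
    pvLoopP l1 l2 (p :: rest) hv ch =
      (if (if ch.contains p.1 then ch else ch.insert p.1 p.2).get? p.1 ≠ some p.2 then false
       else pvLoopP l1 l2 rest (PySem.Set.add hv p.2)
              (if ch.contains p.1 then ch else ch.insert p.1 p.2)) := rfl

lemma pvLoopA_cons (l1 l2 : List Char) (i : Int) (rest : List Int)
    (hv : PySem.Set Char) (ch : PySem.Dict Char Char) (c1 c2 : Char)
    (hg1 : PySem.List.pyGet? l1 i = some c1) (hg2 : PySem.List.pyGet? l2 i = some c2) :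
    pvLoopA l1 l2 (i :: rest) hv ch =
      (if (if ch.contains c1 then ch else ch.insert c1 c2).get? c1 ≠ some c2 then false
       else pvLoopA l1 l2 rest (PySem.Set.add hv c2)
              (if ch.contains c1 then ch else ch.insert c1 c2)) := by
  show (match PySem.List.pyGet? l2 i, PySem.List.pyGet? l1 i with
        | some c2, some c1 =>
            if (if ch.contains c1 then ch else ch.insert c1 c2).get? c1 ≠ some c2 then false
            else pvLoopA l1 l2 rest (PySem.Set.add hv c2) (if ch.contains c1 then ch else ch.insert c1 c2)
        | _, _ => false) = _
  rw [hg1, hg2]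

lemma pvLoopA_eq_loopP (l1 l2 : List Char) (hlen : l1.length = l2.length) :
    ∀ (n k : Nat), l1.length - k = n → ∀ (hv : PySem.Set Char) (ch : PySem.Dict Char Char),
    pvLoopA l1 l2 (PySem.List.pyRange k l1.length 1) hv ch =
      pvLoopP l1 l2 ((l1.drop k).zip (l2.drop k)) hv ch := by
  intro n
  induction n with
  | zero =>
    intro k hk hv ch
    have hk' : l1.length ≤ k := by omega
    have hr : PySem.List.pyRange (k : Int) (l1.length : Int) 1 = [] := by
      simp [PySem.List.pyRange]; omega
    rw [hr, List.drop_eq_nil_of_le hk', List.drop_eq_nil_of_le (by omega)]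
    simp [pvLoopA, pvLoopP]
  | succ n ih =>
    intro k hk hv ch
    have hklt : k < l1.length := by omega
    have hklt2 : k < l2.length := by omega
    have hg1 : PySem.List.pyGet? l1 (k : Int) = some l1[k] := by
      simp [List.getElem?_eq_getElem hklt]
    have hg2 : PySem.List.pyGet? l2 (k : Int) = some l2[k] := by
      simp [List.getElem?_eq_getElem hklt2]
    have hd : (l1.drop k).zip (l2.drop k) =
        (l1[k], l2[k]) :: ((l1.drop (k + 1)).zip (l2.drop (k + 1))) := by
      rw [← List.getElem_cons_drop hklt, ← List.getElem_cons_drop hklt2]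
      rfl
    have hcast : (k : Int) + 1 = ((k + 1 : Nat) : Int) := by push_cast; ring
    rw [PySem.List.pyRange_one_cons (by exact_mod_cast hklt),
      pvLoopA_cons l1 l2 k _ hv ch l1[k] l2[k] hg1 hg2, hd, pvLoopP_cons, hcast]
    by_cases h : (if ch.contains l1[k] then ch else ch.insert l1[k] l2[k]).get? l1[k] = some l2[k]
    · rw [if_neg (not_not_intro h), if_neg (not_not_intro h)]
      exact ih (k + 1) (by omega) _ _
    · rw [if_pos h, if_pos h]

-- ===== B-side lemmas =====

-- membership in the image list of character c
lemma pv_mem_images (l1 l2 : List Char) (c b : Char) :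
    b ∈ ((l1.zip l2).filter (fun p => p.1 == c)).map Prod.snd ↔ (c, b) ∈ l1.zip l2 := by
  simp only [List.mem_map, List.mem_filter, beq_iff_eq]
  constructor
  · rintro ⟨⟨a, b'⟩, ⟨hm, rfl⟩, rfl⟩; exact hm
  · intro hm; exact ⟨(c, b), ⟨hm, rfl⟩, rfl⟩

lemma pv_exists_pair (l1 l2 : List Char) (hlen : l1.length = l2.length) (c : Char)
    (hc : c ∈ l1) : ∃ b, (c, b) ∈ l1.zip l2 := by
  obtain ⟨i, hi, rfl⟩ := List.mem_iff_getElem.1 hc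
  refine ⟨l2[i]'(by omega), ?_⟩
  have hiz : i < (l1.zip l2).length := by simp [List.length_zip]; omega
  have hmem := List.getElem_mem hiz
  rwa [List.getElem_zip] at hmem

-- the per-character singleton-image check equals pvFun
lemma pv_groups_iff (l1 l2 : List Char) (hlen : l1.length = l2.length) :
    (∀ c ∈ l1, (PySem.Set.ofList (((l1.zip l2).filter (fun p => p.1 == c)).map Prod.snd)).length = 1)
      ↔ pvFun (l1.zip l2) := by
  constructor
  · intro h a b b' h1 h2
    have ha : a ∈ l1 := (List.of_mem_zip h1).1
    have hcard := h a ha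
    rw [pv_len_ofList, Finset.card_eq_one] at hcard
    obtain ⟨x, hx⟩ := hcard
    have hb : b ∈ ({x} : Finset Char) := hx ▸ List.mem_toFinset.2 ((pv_mem_images l1 l2 a b).2 h1)
    have hb' : b' ∈ ({x} : Finset Char) := hx ▸ List.mem_toFinset.2 ((pv_mem_images l1 l2 a b').2 h2)
    rw [Finset.mem_singleton] at hb hb'
    rw [hb, hb']
  · intro hf c hc
    obtain ⟨b0, hb0⟩ := pv_exists_pair l1 l2 hlen c hc
    rw [pv_len_ofList, Finset.card_eq_one]
    refine ⟨b0, ?_⟩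
    ext y
    simp only [List.mem_toFinset, Finset.mem_singleton, pv_mem_images]
    constructor
    · intro hy; exact hf c y b0 hy hb0
    · intro hy; exact hy ▸ hb0

-- B's loop as an 'all distinct characters pass' conjunction
lemma pvLoopB_eq (l1 l2 : List Char) (cs : List Char) :
    pvLoopB l1 l2 cs =
      (decide (∀ c ∈ cs, (PySem.Set.ofList (((l1.zip l2).filter (fun p => p.1 == c)).map Prod.snd)).length = 1) &&
        (decide ((PySem.Set.ofList l2).length < 26) || decide (l1 = l2))) := by
  induction cs with
  | nil =>
    show (decide ((PySem.Set.ofList l2).length < 26) || decide (l1 = l2)) = _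
    simp
  | cons c rest ih =>
    show (if (PySem.Set.ofList (((l1.zip l2).filter (fun p => p.1 == c)).map Prod.snd)).length ≠ 1
          then false else pvLoopB l1 l2 rest) = _
    by_cases h : (PySem.Set.ofList (((l1.zip l2).filter (fun p => p.1 == c)).map Prod.snd)).length = 1
    · rw [if_neg (not_not_intro h)]
      refine ih.trans ?_
      simp only [List.forall_mem_cons, h, true_and]
    · rw [if_pos h]
      have hd : decide (∀ x ∈ c :: rest, (PySem.Set.ofList (((l1.zip l2).filter (fun p => p.1 == x)).map Prod.snd)).length = 1) = false :=
        decide_eq_false (fun hall => h (hall c (by simp)))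
      rw [hd, Bool.false_and]

lemma pv_main (str1 str2 : String) : if_transformable str1 str2 = if_transformable_alt str1 str2 := by
  show (if str1.toList.length ≠ str2.toList.length then false
        else pvLoopA str1.toList str2.toList (PySem.List.pyRange 0 str1.toList.length 1)
               PySem.Set.empty PySem.Dict.empty)
      = (if str1.toList.length ≠ str2.toList.length then false
        else pvLoopB str1.toList str2.toList (PySem.Set.ofList str1.toList))
  set l1 := str1.toList with hl1
  set l2 := str2.toList with hl2
  by_cases hlen : l1.length = l2.length
  · rw [if_neg (not_not_intro hlen), if_neg (not_not_intro hlen)]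
    have h0 : pvLoopA l1 l2 (PySem.List.pyRange 0 l1.length 1) PySem.Set.empty PySem.Dict.empty =
        pvLoopP l1 l2 (l1.zip l2) PySem.Set.empty PySem.Dict.empty := by
      have := pvLoopA_eq_loopP l1 l2 hlen l1.length 0 (by omega) PySem.Set.empty PySem.Dict.empty
      simpa using this
    rw [h0, pvLoopP_eq, pvLoopB_eq]
    have hsnd : (l1.zip l2).map Prod.snd = l2 := List.map_snd_zip (le_of_eq hlen.symm)
    have hfst : (l1.zip l2).map Prod.fst = l1 := List.map_fst_zip (le_of_eq hlen)
    rw [hsnd, PySem.Set.update_empty, pvExt_size, hfst]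
    have hall : (∀ c ∈ PySem.Set.ofList l1, (PySem.Set.ofList (((l1.zip l2).filter (fun p => p.1 == c)).map Prod.snd)).length = 1)
        ↔ pvFun (l1.zip l2) := by
      rw [← pv_groups_iff l1 l2 hlen]
      constructor
      · intro h c hc; exact h c ((PySem.Set.mem_ofList _ _).2 hc)
      · intro h c hc; exact h c ((PySem.Set.mem_ofList _ _).1 hc)
    by_cases hf : pvFun (l1.zip l2)
    · rw [show pvOk PySem.Dict.empty (l1.zip l2) = true from (pvOk_empty_iff _).2 hf]
      rw [show decide (∀ c ∈ PySem.Set.ofList l1, (PySem.Set.ofList (((l1.zip l2).filter (fun p => p.1 == c)).map Prod.snd)).length = 1) = true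
            from decide_eq_true (hall.2 hf)]
      have hle : (PySem.Set.ofList l2).length ≤ (PySem.Set.ofList l1).length := by
        have := pv_card_le (l1.zip l2) hf
        rwa [hsnd, hfst] at this
      simp [hle]
    · rw [show pvOk PySem.Dict.empty (l1.zip l2) = false by
            cases h : pvOk PySem.Dict.empty (l1.zip l2)
            · rfl
            · exact absurd ((pvOk_empty_iff _).1 h) hf]
      rw [show decide (∀ c ∈ PySem.Set.ofList l1, (PySem.Set.ofList (((l1.zip l2).filter (fun p => p.1 == c)).map Prod.snd)).length = 1) = false by
            simp only [decide_eq_false_iff_not]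
            exact fun h => hf (hall.1 h)]
      simp
  · rw [if_pos hlen, if_pos hlen]

-- ===== VERDICT (by name: the statement is the Claim_ definition above) =====
theorem if_transformable_spec : Claim_equal_if_transformable := by
  intro str1 str2 _
  unfold Spec_if_transformable
  exact pv_main str1 str2
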